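-- pv_equiv track=rewrite | github.com/VeriFIT/retro | src/SmtWrapper.py | _create_dep_graph
-- ===== SOURCE A (Python) =====
-- def _create_dep_graph(chunks, raw_eqs):
--     edges = list()
--     n = len(chunks)
--     for i in range(n):
--         for sym in chunks[i]:
--             for j in range(n):
--                 if i == j:
--                     continue
--                 for left, right in raw_eqs[j]:
--                     if sym in left or sym in right:
--                         edges.append((i, j))
--                         break
--     return edges
-- ===== SOURCE B (Python) =====
-- def _create_dep_graph(chunks, raw_eqs):
--     n = len(chunks)
--     eqs = raw_eqs[:n]
--     memo = {}
--     edges = []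
--     for i, syms in enumerate(chunks):
--         for sym in syms:
--             js = memo.get(sym)
--             if js is None:
--                 js = [j for j, ej in enumerate(eqs)
--                       if any(sym in l or sym in r for l, r in ej)]
--                 memo[sym] = js
--             for j in js:
--                 if j != i:
--                     edges.append((i, j))
--     return edges
-- ===== Notes on version B (the rewrite author's own statement) =====
-- stated objective: alternative
-- what changed: B slices raw_eqs once and memoizes, per distinct symbol, the list of matching equation-chunk indices in a dict built on demand, then emits edges from that cached list; A rescans every equation list for every (chunk, symbol, other-chunk) triple.
-- outside the precondition, e.g. on _create_dep_graph([[], []], []): A returns [], B returns []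
import Mathlib
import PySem

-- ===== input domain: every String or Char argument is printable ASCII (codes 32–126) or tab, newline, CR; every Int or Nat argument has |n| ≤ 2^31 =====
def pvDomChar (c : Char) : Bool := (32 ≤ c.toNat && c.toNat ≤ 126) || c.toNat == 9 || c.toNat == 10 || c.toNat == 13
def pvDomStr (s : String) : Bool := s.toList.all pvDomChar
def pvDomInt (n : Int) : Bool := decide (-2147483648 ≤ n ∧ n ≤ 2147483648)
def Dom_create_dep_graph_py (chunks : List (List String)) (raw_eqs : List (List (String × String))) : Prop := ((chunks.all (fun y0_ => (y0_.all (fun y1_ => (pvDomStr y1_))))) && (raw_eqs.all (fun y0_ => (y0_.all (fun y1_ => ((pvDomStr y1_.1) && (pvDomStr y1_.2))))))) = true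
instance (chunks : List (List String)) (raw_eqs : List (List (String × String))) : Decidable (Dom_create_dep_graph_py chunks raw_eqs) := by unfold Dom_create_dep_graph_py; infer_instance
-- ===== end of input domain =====

-- B memoizes, per distinct symbol, the list of equation-chunk indices it occurs in (a dict built on demand),
-- so repeated symbols never rescan the equations; return-value equivalence, neither version mutates its arguments.

-- ===== PORT A =====

-- 'sym in left or sym in right' (substring tests)
def pvMatch (sym : String) (e : String × String) : Bool :=
  PySem.Str.isIn sym e.1 || PySem.Str.isIn sym e.2

def create_dep_graph_py (chunks : List (List String)) (raw_eqs : List (List (String × String))) : List (Int × Int) :=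
  let n : Int := chunks.length
  (PySem.List.pyRange 0 n 1).foldl (fun edges i =>
    (PySem.List.pyGetD chunks i []).foldl (fun edges sym =>
      (PySem.List.pyRange 0 n 1).foldl (fun edges j =>
        if i == j then edges
        else
          -- 'for left, right in raw_eqs[j]: if …: append; break' = append once if any equation matches
          if (PySem.List.pyGetD raw_eqs j []).any (pvMatch sym) then edges ++ [(i, j)]
          else edges) edges) edges) []

-- ===== PORT B =====

-- Source B's comprehension: [j for j, ej in enumerate(eqs) if any(sym in l or sym in r for l, r in ej)]
def pvMatches (eqs : List (List (String × String))) (sym : String) : List Int :=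
  (PySem.List.enumerate eqs 0).filterMap (fun p => if p.2.any (pvMatch sym) then some p.1 else none)

-- one symbol of chunk i: look the match list up in the memo dict, computing and inserting it on a miss,
-- then append (i, j) for every j ≠ i of the list
def pvStepSym (eqs : List (List (String × String))) (i : Int)
    (st : PySem.Dict String (List Int) × List (Int × Int)) (sym : String) :
    PySem.Dict String (List Int) × List (Int × Int) :=
  let (memo, js) :=
    match PySem.Dict.get? st.1 sym with
    | some js => (st.1, js)
    | none => let js := pvMatches eqs sym; (PySem.Dict.insert st.1 sym js, js)
  (memo, js.foldl (fun edges j => if j != i then edges ++ [(i, j)] else edges) st.2)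

def create_dep_graph_py_alt (chunks : List (List String)) (raw_eqs : List (List (String × String))) : List (Int × Int) :=
  let eqs := PySem.List.slice raw_eqs none (some (chunks.length : Int))
  ((PySem.List.enumerate chunks 0).foldl
    (fun st p => p.2.foldl (pvStepSym eqs p.1) st)
    (PySem.Dict.empty, [])).2

-- ===== PRECONDITION & SPEC =====
-- Pre_ excludes the inputs on which A raises IndexError (with at least two chunks and any symbol
-- present, A reads raw_eqs[j] for every j < len(chunks), so raw_eqs may not be shorter than chunks);
-- this also excludes a few inputs that never touch raw_eqs (e.g. two chunks, both empty).
def Pre_create_dep_graph_py (chunks : List (List String)) (raw_eqs : List (List (String × String))) : Prop :=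
  chunks.length ≤ raw_eqs.length ∨ chunks.length ≤ 1
instance (chunks : List (List String)) (raw_eqs : List (List (String × String))) : Decidable (Pre_create_dep_graph_py chunks raw_eqs) := by unfold Pre_create_dep_graph_py; infer_instance

def pvWitness_create_dep_graph_py : List (List String) × (List (List (String × String))) :=
  ([["x"], ["y"]], [[("y+1", "0")], [("x", "2")]])

def Spec_create_dep_graph_py (chunks : List (List String)) (raw_eqs : List (List (String × String))) (out : List (Int × Int)) : Prop := out = create_dep_graph_py_alt chunks raw_eqs
instance (chunks : List (List String)) (raw_eqs : List (List (String × String))) (out : List (Int × Int)) : Decidable (Spec_create_dep_graph_py chunks raw_eqs out) := by unfold Spec_create_dep_graph_py; infer_instance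

-- ===== CLAIM (what is proved, stated in full; the proofs are below) =====
def Claim_equal_create_dep_graph_py : Prop := ∀ (chunks : List (List String)) (raw_eqs : List (List (String × String))), Dom_create_dep_graph_py chunks raw_eqs → Pre_create_dep_graph_py chunks raw_eqs → Spec_create_dep_graph_py chunks raw_eqs (create_dep_graph_py chunks raw_eqs)

-- ===== LEMMAS AND PROOFS =====

-- the edges one (i, sym) pair contributes, with eqs = raw_eqs[:len(chunks)]
def pvG (eqs : List (List (String × String))) (i : Int) (sym : String) : List (Int × Int) :=
  ((pvMatches eqs sym).filter (fun j => j != i)).map (fun j => (i, j))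

-- dict invariant: every cached list is the match list of its key
def pvInv (eqs : List (List (String × String))) (memo : PySem.Dict String (List Int)) : Prop :=
  ∀ s js, PySem.Dict.get? memo s = some js → js = pvMatches eqs s

theorem pvFilterMap_if {α : Type} (p : α → Bool) (l : List α) :
    l.filterMap (fun x => if p x then some x else none) = l.filter p := by
  induction l with
  | nil => rfl
  | cons x xs ih => by_cases h : p x <;> simp [h, ih]

theorem pvStepSym_eq (eqs : List (List (String × String))) (i : Int)
    (st : PySem.Dict String (List Int) × List (Int × Int)) (sym : String)
    (h : pvInv eqs st.1) :
    (pvStepSym eqs i st sym).2 = st.2 ++ pvG eqs i sym ∧ pvInv eqs (pvStepSym eqs i st sym).1 := by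
  unfold pvStepSym pvG
  cases hg : PySem.Dict.get? st.1 sym with
  | some js =>
      simp only [hg]
      refine ⟨?_, h⟩
      rw [h sym js hg, PySem.List.foldl_append_if (fun j => j != i) (fun j => (i, j))]
  | none =>
      simp only [hg]
      constructor
      · rw [PySem.List.foldl_append_if (fun j => j != i) (fun j => (i, j))]
      · intro s js hjs
        by_cases hs : s = sym
        · subst hs
          rw [PySem.Dict.get?_insert_self] at hjs
          exact (Option.some_inj.mp hjs).symm
        · rw [PySem.Dict.get?_insert_of_ne _ _ hs] at hjs
          exact h s js hjs

theorem pvSymsFold (eqs : List (List (String × String))) (i : Int) (syms : List String)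
    (memo : PySem.Dict String (List Int)) (edges : List (Int × Int)) (h : pvInv eqs memo) :
    (syms.foldl (pvStepSym eqs i) (memo, edges)).2 = edges ++ syms.flatMap (pvG eqs i) ∧
    pvInv eqs (syms.foldl (pvStepSym eqs i) (memo, edges)).1 := by
  induction syms generalizing memo edges with
  | nil => simpa using h
  | cons sym rest ih =>
      obtain ⟨h1, h2⟩ := pvStepSym_eq eqs i (memo, edges) sym h
      simp only [List.foldl_cons, List.flatMap_cons]
      have := ih (pvStepSym eqs i (memo, edges) sym).1 (pvStepSym eqs i (memo, edges) sym).2 h2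
      rw [h1, List.append_assoc, ← h1] at this
      exact this

theorem pvBFold (eqs : List (List (String × String))) (l : List (Int × List String))
    (memo : PySem.Dict String (List Int)) (edges : List (Int × Int)) (h : pvInv eqs memo) :
    (l.foldl (fun st p => p.2.foldl (pvStepSym eqs p.1) st) (memo, edges)).2 =
      edges ++ l.flatMap (fun p => p.2.flatMap (pvG eqs p.1)) := by
  induction l generalizing memo edges with
  | nil => simp
  | cons p rest ih =>
      simp only [List.foldl_cons, List.flatMap_cons]
      obtain ⟨h1, h2⟩ := pvSymsFold eqs p.1 p.2 memo edges h
      have := ih (p.2.foldl (pvStepSym eqs p.1) (memo, edges)).1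
        (p.2.foldl (pvStepSym eqs p.1) (memo, edges)).2 h2
      rw [h1, List.append_assoc, ← h1] at this
      exact this

-- pvMatches as a filtered range
theorem pvMatches_eq (eqs : List (List (String × String))) (sym : String) :
    pvMatches eqs sym =
      (PySem.List.pyRange 0 (eqs.length : Int) 1).filter
        (fun j => (PySem.List.pyGetD eqs j []).any (pvMatch sym)) := by
  unfold pvMatches
  rw [PySem.List.enumerate_eq_map_pyRange eqs ([] : List (String × String)), List.filterMap_map,
    PySem.List.len_eq]
  exact pvFilterMap_if _ _

-- A's inner j-loop for one (i, sym), rewritten to the conditional-append shape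
theorem pvAInner (chunks : List (List String)) (raw_eqs : List (List (String × String)))
    (i : Int) (sym : String) (edges : List (Int × Int))
    (hpre : chunks.length ≤ raw_eqs.length ∨ chunks.length ≤ 1)
    (hi0 : 0 ≤ i) (hin : i < (chunks.length : Int)) :
    ((PySem.List.pyRange 0 (chunks.length : Int) 1).foldl (fun edges j =>
        if i == j then edges
        else if (PySem.List.pyGetD raw_eqs j []).any (pvMatch sym) then edges ++ [(i, j)]
        else edges) edges) =
      edges ++ pvG (PySem.List.slice raw_eqs none (some (chunks.length : Int))) i sym := by
  have hbody : (fun (edges : List (Int × Int)) (j : Int) =>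
      if i == j then edges
      else if (PySem.List.pyGetD raw_eqs j []).any (pvMatch sym) then edges ++ [(i, j)]
      else edges) =
      (fun edges j =>
        if (j != i && (PySem.List.pyGetD raw_eqs j []).any (pvMatch sym)) then edges ++ [(i, j)]
        else edges) := by
    funext edges j
    by_cases hij : i = j
    · simp [hij, bne]
    · have h1 : (i == j) = false := by simp [hij]
      have h2 : (j != i) = true := by simp [bne_iff_ne]; omega
      rw [h1, h2]
      simp only [Bool.true_and, Bool.false_eq_true, if_false]
  rw [hbody, PySem.List.foldl_append_if
      (fun j => (j != i && (PySem.List.pyGetD raw_eqs j []).any (pvMatch sym)))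
      (fun j => (i, j))]
  congr 1
  unfold pvG
  rw [pvMatches_eq, List.filter_filter, PySem.List.slice_to_natCast]
  rcases hpre with hle | h1
  · have hlen : (raw_eqs.take chunks.length).length = chunks.length := by
      simp [List.length_take, Nat.min_eq_left hle]
    rw [hlen]
    apply congrArg
    apply List.filter_congr
    intro j hj
    rw [PySem.List.mem_pyRange_one] at hj
    obtain ⟨hj0, hjn⟩ := hj
    have hjeq : j = ((j.toNat : Int)) := by omega
    have hjlt : j.toNat < chunks.length := by omega
    have hget : PySem.List.pyGetD (raw_eqs.take chunks.length) j [] = PySem.List.pyGetD raw_eqs j [] := by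
      rw [hjeq, PySem.List.pyGetD_natCast, PySem.List.pyGetD_natCast]
      simp [List.getD, hjlt]
    rw [hget]
  · -- len(chunks) ≤ 1: with 0 ≤ i < len(chunks) we have len(chunks) = 1 and i = 0;
    -- every index of either range equals 0 = i, so both filters are empty
    have hn1 : chunks.length = 1 := by omega
    have hi : i = 0 := by omega
    subst hi
    have e1 : ∀ (xs : List (List (String × String))) (m : Int), m ≤ 1 →
        ((PySem.List.pyRange 0 m 1).filter
          (fun j => (j != (0:Int) && (PySem.List.pyGetD xs j []).any (pvMatch sym)))) = [] := by
      intro xs m hm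
      rw [List.filter_eq_nil_iff]
      intro a ha
      rw [PySem.List.mem_pyRange_one] at ha
      have : a = 0 := by omega
      simp [this, bne]
    rw [hn1]
    rw [e1 raw_eqs _ (by norm_num), e1 (raw_eqs.take 1) _ (by exact_mod_cast List.length_take_le 1 raw_eqs)]

-- A as a flatMap over enumerate
theorem pvA_eq (chunks : List (List String)) (raw_eqs : List (List (String × String)))
    (hpre : chunks.length ≤ raw_eqs.length ∨ chunks.length ≤ 1) :
    create_dep_graph_py chunks raw_eqs =
      (PySem.List.enumerate chunks).flatMap
        (fun p => p.2.flatMap (pvG (PySem.List.slice raw_eqs none (some (chunks.length : Int))) p.1)) := by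
  unfold create_dep_graph_py
  rw [PySem.List.enumerate_eq_map_pyRange chunks ([] : List String), List.flatMap_map,
    PySem.List.len_eq]
  dsimp only
  have hfg : ∀ (acc : List (Int × Int)), ∀ i ∈ PySem.List.pyRange 0 (chunks.length : Int) 1,
      (PySem.List.pyGetD chunks i []).foldl (fun edges sym =>
        (PySem.List.pyRange 0 (chunks.length : Int) 1).foldl (fun edges j =>
          if i == j then edges
          else if (PySem.List.pyGetD raw_eqs j []).any (pvMatch sym) then edges ++ [(i, j)]
          else edges) edges) acc =
      acc ++ (PySem.List.pyGetD chunks i []).flatMap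
        (pvG (PySem.List.slice raw_eqs none (some (chunks.length : Int))) i) := by
    intro acc i hi
    rw [PySem.List.mem_pyRange_one] at hi
    have hb : (fun (edges : List (Int × Int)) (sym : String) =>
        (PySem.List.pyRange 0 (chunks.length : Int) 1).foldl (fun edges j =>
          if i == j then edges
          else if (PySem.List.pyGetD raw_eqs j []).any (pvMatch sym) then edges ++ [(i, j)]
          else edges) edges) =
        (fun edges sym => edges ++ pvG (PySem.List.slice raw_eqs none (some (chunks.length : Int))) i sym) :=
      funext fun edges => funext fun sym => pvAInner chunks raw_eqs i sym edges hpre hi.1 hi.2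
    rw [hb, PySem.List.foldl_append_eq_flatMap]
  rw [PySem.List.foldl_congr_mem _ _ _ _ hfg, PySem.List.foldl_append_eq_flatMap]
  simp

-- ===== VERDICT (by name: the statement is the Claim_ definition above) =====
theorem create_dep_graph_py_spec : Claim_equal_create_dep_graph_py := by
  intro chunks raw_eqs _ hpre
  unfold Spec_create_dep_graph_py create_dep_graph_py_alt
  rw [pvA_eq chunks raw_eqs hpre]
  rw [pvBFold _ _ PySem.Dict.empty []
    (by intro s js hjs; simp [PySem.Dict.get?, PySem.Dict.empty] at hjs)]
  simp
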